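-- pv_equiv track=rewrite | github.com/clulab/tomcat-speech | data_prep/data_prep_helpers.py | clean_up_word
-- ===== SOURCE A (Python) =====
-- def clean_up_word(word):
--     word = word.replace("\x92", "'")
--     word = word.replace("\x91", "")
--     word = word.replace("\x97", "-")
--     # clean up word by putting in lowercase + removing punct
--     punct = [
--         ",",
--         ".",
--         "!",
--         "?",
--         ";",
--         ":",
--         "'",
--         '"',
--         "-",
--         "$",
--         "’",
--         "…",
--         "[",
--         "]",
--         "(",
--         ")",
--     ]
--     for char in word:
--         if char in punct:
--             word = word.replace(char, " ")
--     if word.strip() == "":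
--         word = "<UNK>"
--     return word
-- ===== SOURCE B (Python) =====
-- _PUNCT = [",", ".", "!", "?", ";", ":", "'", '"', "-", "$", "\u2019", "\u2026", "[", "]", "(", ")"]
-- _TABLE = str.maketrans({c: " " for c in _PUNCT})
--
--
-- def clean_up_word(word):
--     word = word.replace("\x92", "'").replace("\x91", "").replace("\x97", "-")
--     word = word.translate(_TABLE)
--     return "<UNK>" if word.strip() == "" else word
-- ===== Notes on version B (the rewrite author's own statement) =====
-- stated objective: faster
-- what changed: Replaced the per-character loop of repeated full-string word.replace scans with one str.maketrans translation table applied in a single word.translate pass.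
import Mathlib
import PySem

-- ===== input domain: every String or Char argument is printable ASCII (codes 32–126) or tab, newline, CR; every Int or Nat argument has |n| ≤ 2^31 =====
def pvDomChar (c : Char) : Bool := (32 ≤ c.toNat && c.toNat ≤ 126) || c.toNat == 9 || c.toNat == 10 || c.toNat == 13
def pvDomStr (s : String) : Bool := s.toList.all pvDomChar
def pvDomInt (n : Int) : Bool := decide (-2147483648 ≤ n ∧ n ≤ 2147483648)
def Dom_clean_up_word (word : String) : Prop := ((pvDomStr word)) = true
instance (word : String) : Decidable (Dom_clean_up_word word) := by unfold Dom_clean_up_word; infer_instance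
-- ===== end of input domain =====

-- B replaces A's per-character loop of repeated word.replace scans by a single
-- translation-table pass (str.maketrans/translate); same values everywhere.

-- the punctuation list of A (1-char strings in Python; membership of a 1-char string
-- in that list is exactly Char membership here)
def pvPunct : List Char :=
  [',', '.', '!', '?', ';', ':', '\'', '"', '-', '$', '’', '…', '[', ']', '(', ')']

-- ===== PORT A =====
def clean_up_word (word : String) : String :=
  let w0 := PySem.Str.replace word "\x92" "'"
  let w1 := PySem.Str.replace w0 "\x91" ""
  let w2 := PySem.Str.replace w1 "\x97" "-"
  -- for char in word: if char in punct: word = word.replace(char, " ")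
  -- (the loop iterates over the string as it was at loop entry)
  let w3 := w2.toList.foldl
    (fun w c => if c ∈ pvPunct then PySem.Str.replace w (String.ofList [c]) " " else w) w2
  if PySem.Str.strip w3 = "" then "<UNK>" else w3

-- ===== PORT B =====
-- the translation table maps each punctuation code point to ' '; translate is one map pass
def clean_up_word_alt (word : String) : String :=
  let w := PySem.Str.replace
    (PySem.Str.replace (PySem.Str.replace word "\x92" "'") "\x91" "") "\x97" "-"
  let t := String.ofList (w.toList.map (fun c => if c ∈ pvPunct then ' ' else c))
  if PySem.Str.strip t = "" then "<UNK>" else t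

-- ===== PRECONDITION & SPEC =====
def Spec_clean_up_word (word : String) (out : String) : Prop := out = clean_up_word_alt word
instance (word : String) (out : String) : Decidable (Spec_clean_up_word word out) := by unfold Spec_clean_up_word; infer_instance

-- ===== CLAIM (what is proved, stated in full; the proofs are below) =====
def Claim_equal_clean_up_word : Prop := ∀ (word : String), Dom_clean_up_word word → Spec_clean_up_word word (clean_up_word word)

-- ===== LEMMAS AND PROOFS =====

-- replacing one single character by one single character is a map
theorem replace_go_single (c d : Char) :
    ∀ (fuel : Nat) (l acc : List Char), l.length ≤ fuel →
      PySem.Chars.replace.go [c] [d] fuel l acc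
        = acc.reverse ++ l.map (fun x => if x = c then d else x) := by
  intro fuel
  induction fuel with
  | zero =>
      intro l acc h
      have : l = [] := List.length_eq_zero_iff.mp (Nat.le_zero.mp h)
      subst this
      simp [PySem.Chars.replace.go]
  | succ n ih =>
      intro l acc h
      cases l with
      | nil => simp [PySem.Chars.replace.go]
      | cons x t =>
          have hlen : t.length ≤ n := by simpa using h
          by_cases hx : x = c
          · subst hx
            have step : PySem.Chars.replace.go [x] [d] (n + 1) (x :: t) acc
                = PySem.Chars.replace.go [x] [d] n t ([d].reverse ++ acc) := by
              simp [PySem.Chars.replace.go, List.isPrefixOf]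
            rw [step, ih t _ hlen]
            simp
          · have step : PySem.Chars.replace.go [c] [d] (n + 1) (x :: t) acc
                = PySem.Chars.replace.go [c] [d] n t (x :: acc) := by
              simp [PySem.Chars.replace.go, List.isPrefixOf, Ne.symm hx]
            rw [step, ih t _ hlen]
            simp [hx]

theorem replace_single (c d : Char) (s : List Char) :
    PySem.Chars.replace s [c] [d] = s.map (fun x => if x = c then d else x) := by
  rw [PySem.Chars.replace]
  simp only [List.isEmpty_cons, Bool.false_eq_true, if_false]
  simpa using replace_go_single c d s.length s [] le_rfl

-- the loop invariant: folding single-character replacements over l, starting from acc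
-- whose punctuation characters all occur in l, equals the one-pass translation of acc
theorem foldl_replace_eq_map :
    ∀ (l acc : List Char), (∀ x ∈ acc, x ∈ pvPunct → x ∈ l) →
      l.foldl (fun w c =>
          if c ∈ pvPunct then w.map (fun x => if x = c then ' ' else x) else w) acc
        = acc.map (fun x => if x ∈ pvPunct then ' ' else x) := by
  intro l
  induction l with
  | nil =>
      intro acc h
      simp only [List.foldl_nil]
      have : acc.map (fun x => if x ∈ pvPunct then ' ' else x) = acc.map id := by
        apply List.map_congr_left
        intro x hx
        have hnp : x ∉ pvPunct := fun hp => by simpa using h x hx hp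
        simp [hnp]
      rw [this, List.map_id]
  | cons c t ih =>
      intro acc h
      simp only [List.foldl_cons]
      by_cases hc : c ∈ pvPunct
      · rw [if_pos hc]
        have hcond : ∀ x ∈ acc.map (fun x => if x = c then ' ' else x), x ∈ pvPunct → x ∈ t := by
          intro x hx hxp
          rcases List.mem_map.mp hx with ⟨y, hy, hyx⟩
          by_cases hyc : y = c
          · exfalso
            have hxsp : x = ' ' := by simp [hyc] at hyx; exact hyx.symm
            subst hxsp
            exact absurd hxp (by decide)
          · have hxy : x = y := by simp [hyc] at hyx; exact hyx.symm
            subst hxy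
            rcases List.mem_cons.mp (h x hy hxp) with h1 | h1
            · exact absurd h1 hyc
            · exact h1
        rw [ih _ hcond, List.map_map]
        apply List.map_congr_left
        intro x _
        by_cases hx : x = c
        · subst hx
          have hsp : (' ' : Char) ∉ pvPunct := by decide
          simp [hc, hsp]
        · simp [hx]
      · rw [if_neg hc]
        apply ih
        intro x hx hxp
        rcases List.mem_cons.mp (h x hx hxp) with h1 | h1
        · exact absurd (h1 ▸ hxp) hc
        · exact h1

-- the String-level loop of port A, read through toList
theorem str_fold_toList (l : List Char) (s : String) :
    (l.foldl (fun w c =>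
        if c ∈ pvPunct then PySem.Str.replace w (String.ofList [c]) " " else w) s).toList
      = l.foldl (fun w c =>
          if c ∈ pvPunct then w.map (fun x => if x = c then ' ' else x) else w) s.toList := by
  induction l generalizing s with
  | nil => simp
  | cons c t ih =>
      simp only [List.foldl_cons]
      by_cases hc : c ∈ pvPunct
      · rw [if_pos hc, if_pos hc, ih]
        congr 1
        rw [show (PySem.Str.replace s (String.ofList [c]) " ").toList
              = PySem.Chars.replace s.toList [c] [' '] from by
            simp [PySem.Str.replace]]
        exact replace_single c ' ' s.toList
      · rw [if_neg hc, if_neg hc, ih]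

-- A's whole loop over a string equals B's single translation pass
theorem loop_eq (w : String) :
    w.toList.foldl (fun s c =>
        if c ∈ pvPunct then PySem.Str.replace s (String.ofList [c]) " " else s) w
      = String.ofList (w.toList.map (fun c => if c ∈ pvPunct then ' ' else c)) := by
  have ht := str_fold_toList w.toList w
  rw [foldl_replace_eq_map w.toList w.toList (fun x hx _ => hx)] at ht
  have := congrArg String.ofList ht
  simpa using this

theorem clean_up_word_eq (word : String) :
    clean_up_word word = clean_up_word_alt word := by
  unfold clean_up_word clean_up_word_alt
  simp only [loop_eq]

-- ===== VERDICT (by name: the statement is the Claim_ definition above) =====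
theorem clean_up_word_spec : Claim_equal_clean_up_word := by
  intro word _
  exact clean_up_word_eq word
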